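-- pv_equiv track=rewrite | github.com/jungi-park/Python-Algorithm | programmers/PCCP/택배상자.py | solution
-- ===== SOURCE A (Python) =====
-- from collections import deque
--
-- def solution(order):
--     answer = 0
--     Belt = deque(range(1, len(order) + 1))
--     bojoBelt = deque()
--     order = deque(order)
--
--     while order:
--         x = order.popleft()
--
--         if bojoBelt and bojoBelt[-1] == x:
--             bojoBelt.pop()
--             answer += 1
--         elif Belt and Belt[0] == x:
--             Belt.popleft()
--             answer += 1
--         else:
--             if x in Belt:
--                 finded = Belt.index(x)
--                 for i in range(finded):
--                     bojoBelt.append(Belt.popleft())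
--                 Belt.popleft()
--                 answer += 1
--             else:
--                 break
--
--     return answer
-- ===== SOURCE B (Python) =====
-- def solution(order):
--     n = len(order)
--     ends = {}        # endpoint -> other endpoint of each maximal block of taken numbers
--     taken = set()
--     hi = 0           # largest box number removed from the main belt so far
--     answer = 0
--     for x in order:
--         if hi < x <= n:
--             hi = x
--         elif x < 1 or x > hi or x in taken or ends.get(x + 1, 0) != hi:
--             break
--         lo = ends.get(x - 1, x)
--         rhi = ends.get(x + 1, x)
--         ends[lo] = rhi
--         ends[rhi] = lo
--         taken.add(x)
--         answer += 1
--     return answer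
-- ===== Notes on version B (the rewrite author's own statement) =====
-- stated objective: faster
-- what changed: Replaces A's deque simulation (auxiliary stack plus linear 'x in Belt'/'.index' scans and element-by-element transfers) by a stack-free union of taken numbers into maximal contiguous blocks kept in a hash map of block endpoints: a box x is loadable from the auxiliary pile iff the block starting at x+1 reaches the belt front, an O(1) dictionary check, and each success merges x with its neighbour blocks in O(1).
import Mathlib
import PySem

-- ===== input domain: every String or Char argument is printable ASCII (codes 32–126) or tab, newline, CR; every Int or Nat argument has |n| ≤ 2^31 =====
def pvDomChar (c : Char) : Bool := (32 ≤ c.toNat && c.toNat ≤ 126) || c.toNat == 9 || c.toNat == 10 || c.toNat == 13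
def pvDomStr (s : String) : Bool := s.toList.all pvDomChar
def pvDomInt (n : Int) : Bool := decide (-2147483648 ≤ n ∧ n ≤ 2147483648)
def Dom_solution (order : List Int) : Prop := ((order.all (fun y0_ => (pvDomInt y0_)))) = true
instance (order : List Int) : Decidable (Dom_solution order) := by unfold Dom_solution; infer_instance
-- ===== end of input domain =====

-- B replaces A's auxiliary-stack simulation by merging taken box numbers into maximal
-- contiguous blocks held in a dictionary of block endpoints; objective: faster.

-- ===== PORT A =====
-- 'for i in range(finded): bojoBelt.append(Belt.popleft())' — moves k front elements of the belt onto bojo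
def pvMoveA : Nat → List Int → List Int → List Int × List Int
  | 0, belt, bojo => (belt, bojo)
  | Nat.succ k, belt, bojo => pvMoveA k belt.tail (bojo ++ [belt.headD 0])

def pvLoopA : List Int → List Int → List Int → Int → Int
  | [], _, _, ans => ans
  | x :: rest, belt, bojo, ans =>
    if bojo.getLast? = some x then                     -- bojoBelt and bojoBelt[-1] == x
      pvLoopA rest belt bojo.dropLast (ans + 1)
    else if belt.head? = some x then                   -- Belt and Belt[0] == x
      pvLoopA rest belt.tail bojo (ans + 1)
    else if belt.contains x then                       -- x in Belt
      match PySem.List.index? belt x with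
      | some finded =>
        let p := pvMoveA finded belt bojo
        pvLoopA rest p.1.tail p.2 (ans + 1)
      | none => ans                                    -- unreachable: x ∈ belt
    else ans                                           -- break

def solution (order : List Int) : Int :=
  pvLoopA order (PySem.List.pyRange 1 ((order.length : Int) + 1) 1) [] 0

-- ===== PORT B =====
-- 'lo = ends.get(x-1, x); rhi = ends.get(x+1, x); ends[lo] = rhi; ends[rhi] = lo'
def pvMerge (ends : PySem.Dict Int Int) (x : Int) : PySem.Dict Int Int :=
  let lo := ends.getD (x - 1) x
  let rhi := ends.getD (x + 1) x
  (ends.insert lo rhi).insert rhi lo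

def pvLoopAlt : List Int → Int → PySem.Dict Int Int → PySem.Set Int → Int → Int → Int
  | [], _, _, _, _, ans => ans
  | x :: rest, n, ends, taken, hi, ans =>
    if hi < x ∧ x ≤ n then                             -- if hi < x <= n: hi = x, then merge
      pvLoopAlt rest n (pvMerge ends x) (PySem.Set.add taken x) x (ans + 1)
    else if x < 1 ∨ hi < x ∨ PySem.Set.contains taken x = true ∨ ends.getD (x + 1) 0 ≠ hi then
      ans                                              -- elif …: break
    else
      pvLoopAlt rest n (pvMerge ends x) (PySem.Set.add taken x) hi (ans + 1)

def solution_alt (order : List Int) : Int :=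
  pvLoopAlt order (order.length : Int) PySem.Dict.empty PySem.Set.empty 0 0

-- ===== PRECONDITION & SPEC =====
def Spec_solution (order : List Int) (out : Int) : Prop := out = solution_alt order
instance (order : List Int) (out : Int) : Decidable (Spec_solution order out) := by unfold Spec_solution; infer_instance

-- ===== CLAIM (what is proved, stated in full; the proofs are below) =====
def Claim_equal_solution : Prop := ∀ (order : List Int), Dom_solution order → Spec_solution order (solution order)

-- ===== LEMMAS AND PROOFS =====

-- Ghost intermediate: the obvious front-pointer + stack simulation; A and B are each proved equal to it.
def pvGhost : List Int → Int → Int → List Int → Int → Int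
  | [], _, _, _, ans => ans
  | x :: rest, n, nxt, stack, ans =>
    if stack.getLast? = some x then
      pvGhost rest n nxt stack.dropLast (ans + 1)
    else if nxt ≤ x ∧ x ≤ n then
      pvGhost rest n (x + 1) (stack ++ PySem.List.pyRange nxt x 1) (ans + 1)
    else ans

theorem pvMoveA_spec (k : Nat) (belt bojo : List Int) (hk : k ≤ belt.length) :
    pvMoveA k belt bojo = (belt.drop k, bojo ++ belt.take k) := by
  induction k generalizing belt bojo with
  | zero => simp [pvMoveA]
  | succ k ih =>
    cases belt with
    | nil => simp at hk
    | cons y ys =>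
      simp only [pvMoveA, List.tail_cons, List.headD_cons, List.drop_succ_cons, List.take_succ_cons]
      rw [ih ys _ (by simpa using hk)]
      simp

theorem pvRange_take (a m b : Int) (h1 : a ≤ m) (h2 : m ≤ b) :
    (PySem.List.pyRange a b 1).take (m - a).toNat = PySem.List.pyRange a m 1 := by
  rw [PySem.List.pyRange_one_append a m b h1 h2]
  have h : (m - a).toNat = (PySem.List.pyRange a m 1).length := by
    rw [PySem.List.length_pyRange_one]
  rw [h, List.take_left]

theorem pvRange_drop (a m b : Int) (h1 : a ≤ m) (h2 : m ≤ b) :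
    (PySem.List.pyRange a b 1).drop (m - a).toNat = PySem.List.pyRange m b 1 := by
  rw [PySem.List.pyRange_one_append a m b h1 h2]
  have h : (m - a).toNat = (PySem.List.pyRange a m 1).length := by
    rw [PySem.List.length_pyRange_one]
  rw [h, List.drop_left]

theorem pvRange_index (a b x : Int) (h1 : a ≤ x) (h2 : x < b) :
    PySem.List.index? (PySem.List.pyRange a b 1) x = some (x - a).toNat := by
  rw [PySem.List.index?_eq_some_iff]
  refine ⟨PySem.List.pyRange a x 1, PySem.List.pyRange (x + 1) b 1, ?_, ?_, ?_⟩
  · rw [PySem.List.pyRange_one_append a x b h1 (le_of_lt h2), PySem.List.pyRange_one_cons h2]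
  · rw [PySem.List.length_pyRange_one]
  · intro hmem
    have := (PySem.List.mem_pyRange_one).1 hmem
    omega

theorem pvRange_head?_of_lt (a b : Int) (h : a < b) :
    (PySem.List.pyRange a b 1).head? = some a := by
  rw [PySem.List.pyRange_one_cons h]; rfl

theorem pvMain (rest : List Int) : ∀ (n nxt : Int) (bojo : List Int) (ans : Int),
    pvLoopA rest (PySem.List.pyRange nxt (n + 1) 1) bojo ans = pvGhost rest n nxt bojo ans := by
  induction rest with
  | nil => intro n nxt bojo ans; rfl
  | cons x rest ih =>
    intro n nxt bojo ans
    simp only [pvLoopA, pvGhost]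
    by_cases hb : bojo.getLast? = some x
    · simp only [hb, if_true, ih]
    · simp only [if_neg hb]
      by_cases h2 : nxt ≤ x ∧ x ≤ n
      · rcases h2 with ⟨hx1, hx2⟩
        by_cases hxe : x = nxt
        · subst hxe
          rw [if_pos (pvRange_head?_of_lt x (n + 1) (by omega)),
              if_pos (⟨le_refl x, hx2⟩ : x ≤ x ∧ x ≤ n)]
          rw [PySem.List.pyRange_one_cons (show x < n + 1 by omega), List.tail_cons,
              PySem.List.pyRange_one_eq_nil (le_refl x), List.append_nil, ih]
        · have hlt : nxt < x := lt_of_le_of_ne hx1 (fun h => hxe h.symm)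
          have hhd : (PySem.List.pyRange nxt (n + 1) 1).head? ≠ some x := by
            rw [pvRange_head?_of_lt nxt (n + 1) (by omega)]
            intro h; exact hxe (by injection h with h; omega)
          rw [if_neg hhd]
          have hmem : x ∈ PySem.List.pyRange nxt (n + 1) 1 :=
            (PySem.List.mem_pyRange_one).2 ⟨hx1, by omega⟩
          rw [if_pos (List.contains_iff_mem.2 hmem), pvRange_index nxt (n + 1) x hx1 (by omega)]
          have hk : (x - nxt).toNat ≤ (PySem.List.pyRange nxt (n + 1) 1).length := by
            rw [PySem.List.length_pyRange_one]; omega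
          simp only [pvMoveA_spec _ _ _ hk]
          rw [pvRange_drop nxt x (n + 1) hx1 (by omega),
              pvRange_take nxt x (n + 1) hx1 (by omega),
              PySem.List.pyRange_one_cons (show x < n + 1 by omega), List.tail_cons,
              if_pos (⟨hx1, hx2⟩ : nxt ≤ x ∧ x ≤ n), ih]
      · rw [if_neg h2]
        have hhd : (PySem.List.pyRange nxt (n + 1) 1).head? ≠ some x := by
          intro h
          rcases lt_or_ge nxt (n + 1) with hlt | hge
          · rw [pvRange_head?_of_lt nxt (n + 1) hlt] at h
            injection h with h; omega
          · rw [PySem.List.pyRange_one_eq_nil hge] at h; simp at h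
        rw [if_neg hhd]
        have hmem : ¬ (PySem.List.pyRange nxt (n + 1) 1).contains x := by
          rw [List.contains_iff_mem, PySem.List.mem_pyRange_one]
          omega
        rw [if_neg hmem]

-- [a,b] is a maximal contiguous block of the taken set
def pvRun (taken : PySem.Set Int) (a b : Int) : Prop :=
  a ≤ b ∧ (∀ k, a ≤ k → k ≤ b → k ∈ taken) ∧ (a - 1) ∉ taken ∧ (b + 1) ∉ taken

-- the 'ends' dictionary is correct at the endpoints of every maximal block, and has only taken keys
def pvEndsInv (ends : PySem.Dict Int Int) (taken : PySem.Set Int) : Prop :=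
  (∀ a b, pvRun taken a b → ends.get? a = some b ∧ ends.get? b = some a) ∧
  (∀ k, k ∉ taken → ends.get? k = none)

-- full relation between the ghost state (nxt, stack) and B's state (ends, taken, hi)
def pvInv (nxt : Int) (stack : List Int) (ends : PySem.Dict Int Int)
    (taken : PySem.Set Int) (hi : Int) : Prop :=
  hi = nxt - 1 ∧ 0 ≤ hi ∧
  stack.Pairwise (· < ·) ∧
  (∀ s ∈ stack, 1 ≤ s ∧ s < hi) ∧
  (∀ k, k ∈ taken ↔ (1 ≤ k ∧ k ≤ hi ∧ k ∉ stack)) ∧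
  pvEndsInv ends taken

theorem pvRun_unique {taken : PySem.Set Int} {a b c d : Int}
    (h1 : pvRun taken a b) (h2 : pvRun taken c d) {k : Int}
    (hk1 : a ≤ k) (hk2 : k ≤ b) (hk3 : c ≤ k) (hk4 : k ≤ d) : a = c ∧ b = d := by
  obtain ⟨hab, hin1, hlo1, hhi1⟩ := h1
  obtain ⟨hcd, hin2, hlo2, hhi2⟩ := h2
  constructor
  · by_contra hne
    rcases lt_or_gt_of_ne hne with h | h
    · exact hlo2 (hin1 (c - 1) (by omega) (by omega))
    · exact hlo1 (hin2 (a - 1) (by omega) (by omega))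
  · by_contra hne
    rcases lt_or_gt_of_ne hne with h | h
    · exact hhi1 (hin2 (b + 1) (by omega) (by omega))
    · exact hhi2 (hin1 (d + 1) (by omega) (by omega))

theorem pvExistsRunEnd (taken : PySem.Set Int) (H : Int) (hbd : ∀ k ∈ taken, k ≤ H) :
    ∀ (m : Nat) (a : Int), (H - a).toNat ≤ m → a ∈ taken →
    ∃ b, a ≤ b ∧ (∀ k, a ≤ k → k ≤ b → k ∈ taken) ∧ (b + 1) ∉ taken := by
  intro m
  induction m with
  | zero =>
    intro a hm ha
    refine ⟨a, le_refl a, ?_, ?_⟩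
    · intro k h1 h2; have : k = a := le_antisymm h2 h1; exact this ▸ ha
    · intro hmem; have := hbd _ hmem; have := hbd _ ha; omega
  | succ m ih =>
    intro a hm ha
    by_cases h1 : (a + 1) ∈ taken
    · have hb := hbd _ h1
      obtain ⟨b, hb1, hb2, hb3⟩ := ih (a + 1) (by omega) h1
      refine ⟨b, by omega, ?_, hb3⟩
      intro k hk1 hk2
      rcases eq_or_lt_of_le hk1 with h | h
      · exact h ▸ ha
      · exact hb2 k (by omega) hk2
    · exact ⟨a, le_refl a, fun k h1' h2' => (le_antisymm h2' h1') ▸ ha, h1⟩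

theorem pvExistsRunStart (taken : PySem.Set Int) (hbd : ∀ k ∈ taken, 1 ≤ k) :
    ∀ (m : Nat) (a : Int), (a - 1).toNat ≤ m → a ∈ taken →
    ∃ c, c ≤ a ∧ (∀ k, c ≤ k → k ≤ a → k ∈ taken) ∧ (c - 1) ∉ taken := by
  intro m
  induction m with
  | zero =>
    intro a hm ha
    refine ⟨a, le_refl a, fun k h1 h2 => (le_antisymm h2 h1) ▸ ha, ?_⟩
    intro hmem; have := hbd _ hmem; have := hbd _ ha; omega
  | succ m ih =>
    intro a hm ha
    by_cases h1 : (a - 1) ∈ taken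
    · have hb := hbd _ h1
      obtain ⟨c, hc1, hc2, hc3⟩ := ih (a - 1) (by omega) h1
      refine ⟨c, by omega, ?_, hc3⟩
      intro k hk1 hk2
      rcases eq_or_lt_of_le hk2 with h | h
      · exact h ▸ ha
      · exact hc2 k hk1 (by omega)
    · exact ⟨a, le_refl a, fun k h1' h2' => (le_antisymm h2' h1') ▸ ha, h1⟩

-- the merge step preserves the endpoint-dictionary invariant when a fresh number x is taken
theorem pvMerge_inv (ends : PySem.Dict Int Int) (taken : PySem.Set Int) (x H : Int)
    (hE : pvEndsInv ends taken) (hx : x ∉ taken)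
    (hlo : ∀ k ∈ taken, 1 ≤ k) (hbd : ∀ k ∈ taken, k ≤ H) :
    pvEndsInv (pvMerge ends x) (PySem.Set.add taken x) := by
  obtain ⟨hruns, hkeys⟩ := hE
  -- identify lo
  have hLo : ∃ L, ends.getD (x - 1) x = L ∧ L ≤ x ∧
      (∀ k, L ≤ k → k ≤ x - 1 → k ∈ taken) ∧ (L - 1) ∉ taken ∧ (L - 1) ≠ x := by
    by_cases h1 : (x - 1) ∈ taken
    · obtain ⟨c, hc1, hc2, hc3⟩ :=
        pvExistsRunStart taken hlo (x - 1 - 1).toNat (x - 1) (le_refl _) h1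
      have hrun : pvRun taken c (x - 1) := ⟨hc1, hc2, hc3, by simpa using hx⟩
      have := (hruns _ _ hrun).2
      refine ⟨c, ?_, by omega, hc2, hc3, ?_⟩
      · rw [PySem.Dict.getD_eq_get?_getD, this]; rfl
      · have := hlo _ h1; omega
    · refine ⟨x, ?_, le_refl x, fun k h1' h2' => by omega, by simpa using h1, by omega⟩
      rw [PySem.Dict.getD_eq_get?_getD, hkeys _ h1]; rfl
  -- identify rhi
  have hHi : ∃ R, ends.getD (x + 1) x = R ∧ x ≤ R ∧
      (∀ k, x + 1 ≤ k → k ≤ R → k ∈ taken) ∧ (R + 1) ∉ taken ∧ (R + 1) ≠ x := by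
    by_cases h1 : (x + 1) ∈ taken
    · obtain ⟨b, hb1, hb2, hb3⟩ :=
        pvExistsRunEnd taken H hbd (H - (x + 1)).toNat (x + 1) (le_refl _) h1
      have hrun : pvRun taken (x + 1) b := ⟨hb1, hb2, by simpa using hx, hb3⟩
      have := (hruns _ _ hrun).1
      refine ⟨b, ?_, by omega, hb2, hb3, by omega⟩
      rw [PySem.Dict.getD_eq_get?_getD, this]; rfl
    · refine ⟨x, ?_, le_refl x, fun k h1' h2' => by omega, by simpa using h1, by omega⟩
      rw [PySem.Dict.getD_eq_get?_getD, hkeys _ h1]; rfl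
  obtain ⟨L, hLval, hLle, hLin, hLout, hLne⟩ := hLo
  obtain ⟨R, hRval, hRle, hRin, hRout, hRne⟩ := hHi
  have hmemadd : ∀ k, k ∈ PySem.Set.add taken x ↔ (k ∈ taken ∨ k = x) := by
    intro k; rw [PySem.Set.mem_add]
  -- the merged block [L, R] is a maximal run of taken ∪ {x}
  have hrunLR : pvRun (PySem.Set.add taken x) L R := by
    refine ⟨by omega, ?_, ?_, ?_⟩
    · intro k h1 h2
      rw [hmemadd]
      by_cases hk : k = x
      · exact Or.inr hk
      · rcases lt_or_gt_of_ne hk with h | h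
        · exact Or.inl (hLin k h1 (by omega))
        · exact Or.inl (hRin k (by omega) h2)
    · rw [hmemadd]
      rintro (h | h)
      · exact hLout h
      · exact hLne h
    · rw [hmemadd]
      rintro (h | h)
      · exact hRout h
      · exact hRne h
  have hget : ∀ k, (pvMerge ends x).get? k =
      if k = R then some L else if k = L then some R else ends.get? k := by
    intro k
    simp only [pvMerge, hLval, hRval]
    rw [PySem.Dict.get?_insert, PySem.Dict.get?_insert]
  constructor
  · intro a b hrun
    -- does [a,b] contain x?
    by_cases hxin : a ≤ x ∧ x ≤ b
    · have heq := pvRun_unique hrun hrunLR hxin.1 hxin.2 (by omega) (by omega)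
      obtain ⟨rfl, rfl⟩ := heq
      constructor
      · rw [hget]
        by_cases h1 : a = b
        · simp [h1]
        · simp [h1]
      · rw [hget]; simp
    · -- [a,b] is an old run, disjoint from [L,R]
      have hold : pvRun taken a b := by
        obtain ⟨hab, hin, hlo', hhi'⟩ := hrun
        refine ⟨hab, ?_, ?_, ?_⟩
        · intro k h1 h2
          have := hin k h1 h2
          rw [hmemadd] at this
          rcases this with h | h
          · exact h
          · exact absurd (⟨h ▸ h1, h ▸ h2⟩ : a ≤ x ∧ x ≤ b) hxin
        · intro h; exact hlo' (by rw [hmemadd]; exact Or.inl h)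
        · intro h; exact hhi' (by rw [hmemadd]; exact Or.inl h)
      have ⟨ha, hb⟩ := hruns _ _ hold
      -- endpoints differ from L and R
      have hdisj : ∀ k, a ≤ k → k ≤ b → ¬ (L ≤ k ∧ k ≤ R) := by
        intro k h1 h2 hkr
        obtain ⟨heqa, heqb⟩ := pvRun_unique hrun hrunLR h1 h2 hkr.1 hkr.2
        exact hxin ⟨by omega, by omega⟩
      have haL : a ≠ L := fun h => hdisj a (le_refl a) hrun.1 ⟨by omega, by omega⟩
      have haR : a ≠ R := fun h => hdisj a (le_refl a) hrun.1 ⟨by omega, by omega⟩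
      have hbL : b ≠ L := fun h => hdisj b hrun.1 (le_refl b) ⟨by omega, by omega⟩
      have hbR : b ≠ R := fun h => hdisj b hrun.1 (le_refl b) ⟨by omega, by omega⟩
      constructor
      · rw [hget, if_neg haR, if_neg haL]; exact ha
      · rw [hget, if_neg hbR, if_neg hbL]; exact hb
  · intro k hk
    rw [hmemadd] at hk
    push_neg at hk
    have hkL : k ≠ L := by
      intro h
      rcases eq_or_lt_of_le hLle with h' | h'
      · exact hk.2 (by omega)
      · exact hk.1 (h ▸ hLin L (le_refl L) (by omega))
    have hkR : k ≠ R := by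
      intro h
      rcases eq_or_lt_of_le hRle with h' | h'
      · exact hk.2 (by omega)
      · exact hk.1 (h ▸ hRin R (by omega) (le_refl R))
    rw [hget, if_neg hkR, if_neg hkL]
    exact hkeys _ hk.1

-- strictly increasing list: getLast? is the maximum element
theorem pvLast_is_max {l : List Int} (hp : l.Pairwise (· < ·)) {m : Int}
    (hl : l.getLast? = some m) : ∀ y ∈ l, y ≤ m := by
  induction l with
  | nil => simp at hl
  | cons a l ih =>
    intro y hy
    cases l with
    | nil =>
      simp at hl hy; omega
    | cons b l' =>
      have hl' : (b :: l').getLast? = some m := by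
        rw [List.getLast?_cons_cons] at hl; exact hl
      have hp' := List.Pairwise.of_cons hp
      rcases List.mem_cons.1 hy with rfl | hy'
      · have hb : y < b := (List.pairwise_cons.1 hp).1 b (by simp)
        have := ih hp' hl' b (by simp)
        omega
      · exact ih hp' hl' y hy'

theorem pvLast_of_max {l : List Int} (hp : l.Pairwise (· < ·)) {m : Int}
    (hm : m ∈ l) (hmax : ∀ y ∈ l, y ≤ m) : l.getLast? = some m := by
  induction l with
  | nil => simp at hm
  | cons a l ih =>
    cases l with
    | nil => simp at hm ⊢; simp at hmax; omega
    | cons b l' =>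
      rw [List.getLast?_cons_cons]
      have hp' := List.Pairwise.of_cons hp
      apply ih hp'
      · rcases List.mem_cons.1 hm with rfl | hm'
        · exfalso
          have hb : m < b := (List.pairwise_cons.1 hp).1 b (by simp)
          have := hmax b (by simp)
          omega
        · exact hm'
      · intro y hy; exact hmax y (List.mem_cons_of_mem a hy)

-- characterization of the stack top by B's dictionary test
theorem pvTopChar (nxt : Int) (stack : List Int) (ends : PySem.Dict Int Int)
    (taken : PySem.Set Int) (hi : Int) (hInv : pvInv nxt stack ends taken hi) (x : Int) :
    stack.getLast? = some x ↔
      (1 ≤ x ∧ x ≤ hi ∧ x ∉ taken ∧ ends.getD (x + 1) 0 = hi) := by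
  obtain ⟨hhi, hhi0, hpair, hbnd, hmem, hruns, hkeys⟩ := hInv
  constructor
  · intro hl
    obtain ⟨l', rfl⟩ := List.getLast?_eq_some_iff.1 hl
    have hx : x ∈ l' ++ [x] := by simp
    have hxb := hbnd x hx
    have hxnt : x ∉ taken := by
      intro h; exact ((hmem x).1 h).2.2 hx
    refine ⟨hxb.1, by omega, hxnt, ?_⟩
    have hrun : pvRun taken (x + 1) hi := by
      refine ⟨by omega, ?_, by simpa using hxnt, ?_⟩
      · intro k h1 h2
        rw [hmem]
        refine ⟨by omega, h2, ?_⟩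
        intro hk
        have := pvLast_is_max hpair hl k hk
        omega
      · intro h; have := ((hmem _).1 h).2.1; omega
    rw [PySem.Dict.getD_eq_get?_getD, (hruns _ _ hrun).1]; rfl
  · rintro ⟨h1, h2, h3, h4⟩
    have hxlt : x < hi := by
      rcases eq_or_lt_of_le h2 with rfl | h
      · exfalso
        exact h3 ((hmem x).2 ⟨h1, le_refl x, fun hk => by have := hbnd x hk; omega⟩)
      · exact h
    have hx1t : (x + 1) ∈ taken := by
      by_contra hc
      rw [PySem.Dict.getD_eq_get?_getD, hkeys _ hc] at h4
      simp at h4; omega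
    have hbd : ∀ k ∈ taken, k ≤ hi := fun k hk => ((hmem k).1 hk).2.1
    obtain ⟨b, hb1, hb2, hb3⟩ :=
      pvExistsRunEnd taken hi hbd (hi - (x + 1)).toNat (x + 1) (le_refl _) hx1t
    have hrun : pvRun taken (x + 1) b := ⟨hb1, hb2, by simpa using h3, hb3⟩
    have hbval : b = hi := by
      have := (hruns _ _ hrun).1
      rw [PySem.Dict.getD_eq_get?_getD, this] at h4
      simpa using h4
    have hxs : x ∈ stack := by
      by_contra hc
      exact h3 ((hmem x).2 ⟨h1, h2, hc⟩)
    have hmax : ∀ y ∈ stack, y ≤ x := by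
      intro y hy
      by_contra hc
      have hyb := hbnd y hy
      have : y ∈ taken := hb2 y (by omega) (by omega)
      exact ((hmem y).1 this).2.2 hy
    exact pvLast_of_max hpair hxs hmax

-- the ghost stack loop equals B's loop under the invariant
theorem pvGhost_eq_alt (rest : List Int) :
    ∀ (n nxt : Int) (stack : List Int) (ends : PySem.Dict Int Int)
      (taken : PySem.Set Int) (hi ans : Int), pvInv nxt stack ends taken hi →
      pvGhost rest n nxt stack ans = pvLoopAlt rest n ends taken hi ans := by
  induction rest with
  | nil => intro n nxt stack ends taken hi ans _; rfl
  | cons x rest ih =>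
    intro n nxt stack ends taken hi ans hInv
    have htop := pvTopChar nxt stack ends taken hi hInv x
    obtain ⟨hhi, hhi0, hpair, hbnd, hmem, hE⟩ := hInv
    have hlo : ∀ k ∈ taken, 1 ≤ k := fun k hk => ((hmem k).1 hk).1
    have hbd : ∀ k ∈ taken, k ≤ hi := fun k hk => ((hmem k).1 hk).2.1
    simp only [pvGhost, pvLoopAlt]
    by_cases hbelt : hi < x ∧ x ≤ n
    · -- belt branch in both
      have hnt : stack.getLast? ≠ some x := by
        intro h; have := (htop.1 h).2.1; omega
      rw [if_neg hnt, if_pos (show nxt ≤ x ∧ x ≤ n by omega), if_pos hbelt]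
      apply ih
      have hxnt : x ∉ taken := fun h => by have := hbd _ h; omega
      refine ⟨by omega, by omega, ?_, ?_, ?_, pvMerge_inv ends taken x hi hE hxnt hlo hbd⟩
      · rw [List.pairwise_append]
        refine ⟨hpair, PySem.List.pairwise_lt_pyRange_one nxt x, ?_⟩
        intro s hs r hr
        have := hbnd s hs
        have := (PySem.List.mem_pyRange_one).1 hr
        omega
      · intro s hs
        rcases List.mem_append.1 hs with h | h
        · have := hbnd s h; omega
        · have := (PySem.List.mem_pyRange_one).1 h; omega
      · intro k
        rw [PySem.Set.mem_add, hmem, List.mem_append, PySem.List.mem_pyRange_one]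
        constructor
        · rintro (⟨h1, h2, h3⟩ | hkx)
          · exact ⟨h1, by omega, fun h => h.elim h3 (fun h' => by omega)⟩
          · refine ⟨by omega, by omega, ?_⟩
            rintro (h | h)
            · have := hbnd _ h; omega
            · omega
        · rintro ⟨h1, h2, h3⟩
          rcases eq_or_lt_of_le h2 with heq | hlt
          · exact Or.inr heq
          · by_cases hk : k ≤ hi
            · exact Or.inl ⟨h1, hk, fun h => h3 (Or.inl h)⟩
            · exact absurd (Or.inr ⟨by omega, by omega⟩) h3
    · by_cases hpop : stack.getLast? = some x
      · -- pop branch in both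
        obtain ⟨h1, h2, h3, h4⟩ := htop.1 hpop
        rw [if_pos hpop, if_neg (show ¬ (hi < x ∧ x ≤ n) from hbelt),
            if_neg (show ¬ (x < 1 ∨ hi < x ∨ PySem.Set.contains taken x = true ∨
              ends.getD (x + 1) 0 ≠ hi) by
                push_neg
                refine ⟨by omega, by omega, ?_, h4⟩
                simp only [PySem.Set.contains_eq_listContains]
                simp
                intro h
                exact absurd h h3)]
        apply ih
        obtain ⟨l', rfl⟩ := List.getLast?_eq_some_iff.1 hpop
        have hdrop : (l' ++ [x]).dropLast = l' := by simp
        rw [hdrop]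
        have hpair' : l'.Pairwise (· < ·) := (List.pairwise_append.1 hpair).1
        have hxl' : x ∉ l' := by
          intro h
          have := (List.pairwise_append.1 hpair).2.2 x h x (by simp)
          omega
        refine ⟨hhi, hhi0, hpair', ?_, ?_, pvMerge_inv ends taken x hi hE h3 hlo hbd⟩
        · intro s hs; exact hbnd s (by simp [hs])
        · intro k
          rw [PySem.Set.mem_add, hmem]
          constructor
          · rintro (⟨ha, hb, hc⟩ | rfl)
            · exact ⟨ha, hb, fun h => hc (by simp [h])⟩
            · exact ⟨h1, h2, hxl'⟩
          · rintro ⟨ha, hb, hc⟩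
            by_cases hk : k = x
            · exact Or.inr hk
            · exact Or.inl ⟨ha, hb, fun h => by
                rcases (List.mem_append.1 h) with h' | h'
                · exact hc h'
                · simp at h'; exact hk h'⟩
      · -- break in both
        rw [if_neg hpop, if_neg (show ¬ (nxt ≤ x ∧ x ≤ n) by omega),
            if_neg (show ¬ (hi < x ∧ x ≤ n) from hbelt), if_pos ?_]
        have := mt htop.2 hpop
        push_neg at this
        by_cases c1 : 1 ≤ x
        · by_cases c2 : x ≤ hi
          · by_cases c3 : x ∈ taken
            · refine Or.inr (Or.inr (Or.inl ?_))
              simp only [PySem.Set.contains_eq_listContains]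
              simpa [List.contains_iff_mem] using c3
            · exact Or.inr (Or.inr (Or.inr (this c1 c2 c3)))
          · exact Or.inr (Or.inl (by omega))
        · exact Or.inl (by omega)

-- the invariant holds initially
theorem pvInv_init : pvInv 1 [] PySem.Dict.empty PySem.Set.empty 0 := by
  refine ⟨rfl, le_refl 0, List.Pairwise.nil, by simp, ?_, ?_, ?_⟩
  · intro k
    constructor
    · intro h
      simp [PySem.Set.empty] at h
    · rintro ⟨h1, h2, _⟩; omega
  · intro a b hr
    obtain ⟨hab, hin, _, _⟩ := hr
    have := hin a (le_refl a) hab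
    simp [PySem.Set.empty] at this
  · intro k _; rfl

-- ===== VERDICT (by name: the statement is the Claim_ definition above) =====
theorem solution_spec : Claim_equal_solution := by
  intro order _
  unfold Spec_solution solution solution_alt
  rw [pvMain order order.length 1 [] 0]
  exact pvGhost_eq_alt order order.length 1 [] PySem.Dict.empty PySem.Set.empty 0 0 pvInv_init
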